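-- pv_equiv track=rewrite | github.com/pc5401/my_BOJ | 백준/Silver/10552. DOM/DOM.py | solve
-- ===== SOURCE A (Python) =====
-- def solve(N: int, M: int, P: int, fav: list[int], hate: list[int]) -> int:
--     next_channel = [0] * (M + 1)
--     for a, b in zip(fav, hate):
--         if next_channel[b] == 0:
--             next_channel[b] = a
--
--     visited = [False] * (M + 1)
--     current = P
--     steps = 0
--     while next_channel[current] != 0:
--         if visited[current]:
--             return -1
--         visited[current] = True
--         current = next_channel[current]
--         steps += 1
--     return steps
-- ===== SOURCE B (Python) =====
-- def solve(N: int, M: int, P: int, fav: list[int], hate: list[int]) -> int: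
--     next_channel = [0] * (M + 1)
--     for a, b in zip(fav, hate):
--         if next_channel[b] == 0:
--             next_channel[b] = a
--
--     # Floyd's tortoise-and-hare: the hare advances two hops per round, the
--     # tortoise one; they coincide iff the successor chain from P loops
--     # (pointers over the same functional graph, no visited table needed).
--     slow = P
--     fast = P
--     while True:
--         if next_channel[fast] == 0:
--             break
--         fast = next_channel[fast]
--         if next_channel[fast] == 0:
--             break
--         fast = next_channel[fast]
--         slow = next_channel[slow]
--         if slow == fast:
--             return -1
--
--     # Chain terminates: count its length in a second pass.
--     steps = 0
--     cur = P
--     while next_channel[cur] != 0: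
--         cur = next_channel[cur]
--         steps += 1
--     return steps
-- ===== Notes on version B (the rewrite author's own statement) =====
-- stated objective: alternative
-- what changed: Cycle detection by Floyd's tortoise-and-hare (two pointers at speeds 1 and 2 meet iff the chain loops) replaces A's O(M) visited boolean table and per-step membership test; a terminating chain's length is then counted in a separate pass.
-- outside the precondition, e.g. on solve(1, 1, 0, [9], [1]): A returns 0, B returns 0
import Mathlib
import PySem

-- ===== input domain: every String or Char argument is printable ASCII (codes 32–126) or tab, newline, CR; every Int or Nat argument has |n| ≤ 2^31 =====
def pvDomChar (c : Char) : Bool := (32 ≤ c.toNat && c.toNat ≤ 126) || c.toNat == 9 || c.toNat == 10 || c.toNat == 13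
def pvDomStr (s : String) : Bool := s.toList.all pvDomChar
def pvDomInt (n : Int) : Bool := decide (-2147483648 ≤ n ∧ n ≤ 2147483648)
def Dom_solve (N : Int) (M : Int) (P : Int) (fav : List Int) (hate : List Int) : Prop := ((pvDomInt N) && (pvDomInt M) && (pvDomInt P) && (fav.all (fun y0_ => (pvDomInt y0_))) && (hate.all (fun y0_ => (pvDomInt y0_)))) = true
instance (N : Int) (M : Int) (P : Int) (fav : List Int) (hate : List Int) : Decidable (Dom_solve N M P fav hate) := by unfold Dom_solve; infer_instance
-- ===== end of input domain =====

-- B replaces A's O(M) visited table by Floyd's tortoise-and-hare cycle detection plus a separate counting pass (objective: alternative; return values proved equal).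

-- ===== PORT A =====
-- shared first phase of both Pythons: next_channel = [0]*(M+1); for a,b in zip(fav,hate): if next_channel[b]==0: next_channel[b]=a
-- (the Python read next_channel[b] raises on an out-of-range b — outside Pre_; the total pyGetD/pySetD forms are exact inside Pre_)
def buildNext (M : Int) (pairs : List (Int × Int)) : List Int :=
  pairs.foldl
    (fun nc ab =>
      if PySem.List.pyGetD nc ab.2 0 = 0 then PySem.List.pySetD nc ab.2 ab.1 else nc)
    (List.replicate (M + 1).toNat 0)

-- A's while loop; fuel only makes it total (visited bounds the iterations by (M+1)+1, proved below)
def loopA (L : List Int) (visited : List Bool) (current : Int) (steps : Int) : Nat → Int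
  | 0 => 0
  | fuel + 1 =>
    if PySem.List.pyGetD L current 0 ≠ 0 then
      if PySem.List.pyGetD visited current false then -1
      else loopA L (PySem.List.pySetD visited current true)
             (PySem.List.pyGetD L current 0) (steps + 1) fuel
    else steps

def solve (N : Int) (M : Int) (P : Int) (fav : List Int) (hate : List Int) : Int :=
  let L := buildNext M (fav.zip hate)
  loopA L (List.replicate (M + 1).toNat false) P 0 ((M + 1).toNat + 1)

-- ===== PORT B =====
-- B's Floyd phase: 'while True: if L[fast]==0: break; fast=L[fast]; if L[fast]==0: break; fast=L[fast]; slow=L[slow]; if slow==fast: return -1'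
-- returns true = broke out (chain terminates), false = pointers met (cycle); fuel only makes it total
def loopFloyd (L : List Int) (slow fast : Int) : Nat → Bool
  | 0 => true
  | fuel + 1 =>
    if PySem.List.pyGetD L fast 0 = 0 then true
    else
      let fast1 := PySem.List.pyGetD L fast 0
      if PySem.List.pyGetD L fast1 0 = 0 then true
      else
        let fast2 := PySem.List.pyGetD L fast1 0
        let slow1 := PySem.List.pyGetD L slow 0
        if slow1 = fast2 then false else loopFloyd L slow1 fast2 fuel

-- B's second pass: 'steps=0; cur=P; while L[cur]!=0: cur=L[cur]; steps+=1; return steps'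
def countSteps (L : List Int) (cur : Int) (steps : Int) : Nat → Int
  | 0 => steps
  | fuel + 1 =>
    if PySem.List.pyGetD L cur 0 ≠ 0 then
      countSteps L (PySem.List.pyGetD L cur 0) (steps + 1) fuel
    else steps

def solve_alt (N : Int) (M : Int) (P : Int) (fav : List Int) (hate : List Int) : Int :=
  let L := buildNext M (fav.zip hate)
  let n := (M + 1).toNat
  if loopFloyd L P P (n * n + 1) then countSteps L P 0 (n + 1) else -1

-- ===== PRECONDITION & SPEC =====
-- Pre_ excludes the inputs where Python A raises IndexError: P or some zipped hate entry out of
-- range of the (M+1)-element list, or an out-of-range nonzero zipped fav entry that gets stored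
-- (i.e. no earlier pair already claimed its cell with a nonzero fav value); a stored value is
-- indexed when the walk reaches it, and requiring every STORED value in range is the closed-form
-- over-approximation — whether a stored value is actually reached cannot be read off the input,
-- so Pre_ also excludes some inputs where an out-of-range fav value is stored but never reached
-- and A returns; both programs return the same value there.
def Pre_solve (N : Int) (M : Int) (P : Int) (fav : List Int) (hate : List Int) : Prop :=
  PySem.Raise.InRange (M + 1).toNat P ∧
  ∀ q ∈ (fav.zip hate).zipIdx, PySem.Raise.InRange (M + 1).toNat q.1.2 ∧
    (q.1.1 = 0 ∨ PySem.Raise.InRange (M + 1).toNat q.1.1 ∨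
      ∃ r ∈ (fav.zip hate).zipIdx, r.2 < q.2 ∧ r.1.1 ≠ 0 ∧
        PySem.List.pyIdx? (M + 1).toNat r.1.2 = PySem.List.pyIdx? (M + 1).toNat q.1.2)
instance (N : Int) (M : Int) (P : Int) (fav : List Int) (hate : List Int) : Decidable (Pre_solve N M P fav hate) := by unfold Pre_solve; infer_instance

def pvWitness_solve : Int × Int × Int × List Int × List Int := (1, 2, 0, [1, 2], [0, 1])

def Spec_solve (N : Int) (M : Int) (P : Int) (fav : List Int) (hate : List Int) (out : Int) : Prop := out = solve_alt N M P fav hate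
instance (N : Int) (M : Int) (P : Int) (fav : List Int) (hate : List Int) (out : Int) : Decidable (Spec_solve N M P fav hate out) := by unfold Spec_solve; infer_instance

-- ===== CLAIM (what is proved, stated in full; the proofs are below) =====
def Claim_equal_solve : Prop := ∀ (N : Int) (M : Int) (P : Int) (fav : List Int) (hate : List Int), Dom_solve N M P fav hate → Pre_solve N M P fav hate → Spec_solve N M P fav hate (solve N M P fav hate)

-- ===== LEMMAS AND PROOFS =====

-- the successor chain both programs walk: c, L[c], L[L[c]], … (out-of-range reads default to 0 = stop)
def pvWalk (L : List Int) (c : Int) : Nat → Int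
  | 0 => c
  | k + 1 => PySem.List.pyGetD L (pvWalk L c k) 0

theorem pvWalk_shift (L : List Int) (c : Int) (k : Nat) :
    pvWalk L (PySem.List.pyGetD L c 0) k = pvWalk L c (k + 1) := by
  induction k with
  | zero => rfl
  | succ k ih => simp [pvWalk, ih]

theorem pvWalk_add (L : List Int) (c : Int) (a b : Nat) (h : pvWalk L c a = pvWalk L c b) :
    ∀ d, pvWalk L c (a + d) = pvWalk L c (b + d) := by
  intro d
  induction d with
  | zero => simpa using h
  | succ d ih =>
    show pvWalk L c (a + d + 1) = pvWalk L c (b + d + 1)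
    simp only [pvWalk, ih]

theorem pyIdx_lt {n : Nat} {i : Int} {k : Nat} (h : PySem.List.pyIdx? n i = some k) : k < n := by
  unfold PySem.List.pyIdx? at h
  split_ifs at h <;> simp_all <;> omega

theorem getD_idx_some {α : Type} (xs : List α) (i : Int) (d : α) {n : Nat}
    (h : PySem.List.pyIdx? xs.length i = some n) :
    PySem.List.pyGetD xs i d = xs[n]?.getD d := by
  simp [PySem.List.pyGetD, PySem.List.pyGet?, h]

theorem getD_idx_none {α : Type} (xs : List α) (i : Int) (d : α)
    (h : PySem.List.pyIdx? xs.length i = none) :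
    PySem.List.pyGetD xs i d = d := by
  simp [PySem.List.pyGetD, PySem.List.pyGet?, h]

theorem setD_idx_some {α : Type} (xs : List α) (i : Int) (v : α) {n : Nat}
    (h : PySem.List.pyIdx? xs.length i = some n) :
    PySem.List.pySetD xs i v = xs.set n v := by
  simp [PySem.List.pySetD, PySem.List.pySet?, h]

theorem idx_of_getD_ne (L : List Int) (c : Int) (h : PySem.List.pyGetD L c 0 ≠ 0) :
    ∃ n, PySem.List.pyIdx? L.length c = some n := by
  cases hi : PySem.List.pyIdx? L.length c with
  | none => exact absurd (getD_idx_none L c 0 hi) h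
  | some n => exact ⟨n, rfl⟩

-- equal normalized cells read the same value
theorem getD_congr_idx (L : List Int) (x y : Int)
    (h : PySem.List.pyIdx? L.length x = PySem.List.pyIdx? L.length y) :
    PySem.List.pyGetD L x 0 = PySem.List.pyGetD L y 0 := by
  simp [PySem.List.pyGetD, PySem.List.pyGet?, h]

theorem getD_replicate_false (n : Nat) (x : Int) :
    PySem.List.pyGetD (List.replicate n false) x false = false := by
  cases hi : PySem.List.pyIdx? (List.replicate n (false : Bool)).length x with
  | none => simpa using getD_idx_none _ x false hi
  | some k =>
    rw [getD_idx_some _ x false hi]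
    have hk : k < n := by simpa using pyIdx_lt hi
    simp [hk]

theorem count_false_set (xs : List Bool) : ∀ (n : Nat), xs[n]? = some false →
    (xs.set n true).count false + 1 = xs.count false := by
  induction xs with
  | nil => intro n h; simp at h
  | cons x xs ih =>
    intro n h
    cases n with
    | zero =>
      simp at h
      simp [h]
    | succ n =>
      simp at h
      have := ih n h
      simp [List.set, List.count_cons]
      omega

theorem length_buildNext (M : Int) (pairs : List (Int × Int)) :
    (buildNext M pairs).length = (M + 1).toNat := by
  unfold buildNext
  generalize hL : List.replicate (M + 1).toNat (0 : Int) = init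
  have hlen : init.length = (M + 1).toNat := by rw [← hL]; simp
  clear hL
  induction pairs generalizing init with
  | nil => simpa using hlen
  | cons ab ps ih =>
    simp only [List.foldl_cons]
    apply ih
    split
    · rw [PySem.List.length_pySetD]; exact hlen
    · exact hlen

-- A's loop on a chain with first zero at step j, all chain cells unvisited and pairwise distinct
theorem loopA_term (L : List Int) : ∀ (j : Nat) (c s : Int) (visited : List Bool) (fuel : Nat),
    visited.length = L.length →
    (∀ k < j, PySem.List.pyGetD L (pvWalk L c k) 0 ≠ 0) →
    PySem.List.pyGetD L (pvWalk L c j) 0 = 0 →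
    (∀ k < j, PySem.List.pyGetD visited (pvWalk L c k) false = false) →
    (∀ k l, k < l → l < j →
      PySem.List.pyIdx? L.length (pvWalk L c k) ≠ PySem.List.pyIdx? L.length (pvWalk L c l)) →
    j < fuel →
    loopA L visited c s fuel = s + j := by
  intro j
  induction j with
  | zero =>
    intro c s visited fuel _ _ hj _ _ hf
    obtain ⟨fl, rfl⟩ : ∃ fl, fuel = fl + 1 := ⟨fuel - 1, by omega⟩
    simp only [pvWalk] at hj
    simp [loopA, hj]
  | succ j ih =>
    intro c s visited fuel hlen h0 hj hv hd hf
    obtain ⟨fl, rfl⟩ : ∃ fl, fuel = fl + 1 := ⟨fuel - 1, by omega⟩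
    have hc : PySem.List.pyGetD L c 0 ≠ 0 := by simpa [pvWalk] using h0 0 (Nat.succ_pos j)
    have hvc : PySem.List.pyGetD visited c false = false := by
      simpa [pvWalk] using hv 0 (Nat.succ_pos j)
    rw [loopA, if_pos hc, hvc, if_neg (by simp)]
    obtain ⟨n0, hn0⟩ := idx_of_getD_ne L c hc
    have hn0' : PySem.List.pyIdx? visited.length c = some n0 := by rw [hlen]; exact hn0
    have hset : PySem.List.pySetD visited c true = visited.set n0 true :=
      setD_idx_some visited c true hn0'
    have hres : loopA L (PySem.List.pySetD visited c true) (PySem.List.pyGetD L c 0) (s + 1) fl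
        = (s + 1) + j := by
      apply ih
      · rw [hset]; simpa using hlen
      · intro k hk; rw [pvWalk_shift]; exact h0 (k + 1) (by omega)
      · rw [pvWalk_shift]; exact hj
      · intro k hk
        rw [pvWalk_shift]
        have hne : PySem.List.pyIdx? L.length c ≠ PySem.List.pyIdx? L.length (pvWalk L c (k + 1)) := by
          have := hd 0 (k + 1) (Nat.succ_pos k) (by omega)
          simpa [pvWalk] using this
        rw [hset]
        have hlen' : (visited.set n0 true).length = L.length := by simpa using hlen
        cases hik : PySem.List.pyIdx? L.length (pvWalk L c (k + 1)) with
        | none =>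
          apply getD_idx_none
          rw [hlen']; exact hik
        | some m =>
          have hmn : m ≠ n0 := by
            intro hmn; apply hne; rw [hn0, hik, hmn]
          rw [getD_idx_some _ _ _ (by rw [hlen']; exact hik)]
          rw [List.getElem?_set_ne (by omega)]
          have := hv (k + 1) (by omega)
          rw [getD_idx_some _ _ _ (by rw [hlen]; exact hik)] at this
          exact this
      · intro k l hkl hl
        rw [pvWalk_shift, pvWalk_shift]
        exact hd (k + 1) (l + 1) (by omega) (by omega)
      · omega
    rw [hres]; push_cast; ring

-- A's loop on a chain that never reaches zero returns -1 within (count of unvisited)+1 iterations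
theorem loopA_cycle (L : List Int) : ∀ (fuel : Nat) (visited : List Bool) (c s : Int),
    visited.length = L.length →
    (∀ k, PySem.List.pyGetD L (pvWalk L c k) 0 ≠ 0) →
    visited.count false + 1 ≤ fuel →
    loopA L visited c s fuel = -1 := by
  intro fuel
  induction fuel with
  | zero => intro _ _ _ _ _ hf; omega
  | succ fl ih =>
    intro visited c s hlen hnz hf
    have hc : PySem.List.pyGetD L c 0 ≠ 0 := by simpa [pvWalk] using hnz 0
    rw [loopA, if_pos hc]
    obtain ⟨n0, hn0⟩ := idx_of_getD_ne L c hc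
    have hn0' : PySem.List.pyIdx? visited.length c = some n0 := by rw [hlen]; exact hn0
    by_cases hv : PySem.List.pyGetD visited c false
    · rw [hv, if_pos rfl]
    · rw [eq_false_of_ne_true hv, if_neg (by simp)]
      have hvn : visited[n0]? = some false := by
        have hlt : n0 < visited.length := pyIdx_lt hn0'
        rw [getD_idx_some _ _ _ hn0'] at hv
        rw [List.getElem?_eq_getElem hlt] at hv ⊢
        simp at hv
        simp [hv]
      have hset : PySem.List.pySetD visited c true = visited.set n0 true :=
        setD_idx_some visited c true hn0'
      have hcount := count_false_set visited n0 hvn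
      apply ih
      · rw [hset]; simpa using hlen
      · intro k; rw [pvWalk_shift]; exact hnz (k + 1)
      · rw [hset]; omega

-- distinctness of the cells visited before the first zero successor
theorem walk_cells_distinct (L : List Int) (P : Int)
    (hex : ∃ j, PySem.List.pyGetD L (pvWalk L P j) 0 = 0) :
    ∀ k l, k < l → l < Nat.find hex →
      PySem.List.pyIdx? L.length (pvWalk L P k) ≠ PySem.List.pyIdx? L.length (pvWalk L P l) := by
  intro k l hkl hl heq
  have hstep : pvWalk L P (k + 1) = pvWalk L P (l + 1) := by
    simp only [pvWalk]
    exact getD_congr_idx L _ _ heq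
  have hper := pvWalk_add L P (k + 1) (l + 1) hstep (Nat.find hex - (l + 1))
  have hj : PySem.List.pyGetD L (pvWalk L P (Nat.find hex)) 0 = 0 := Nat.find_spec hex
  rw [show l + 1 + (Nat.find hex - (l + 1)) = Nat.find hex by omega] at hper
  have hzero : PySem.List.pyGetD L (pvWalk L P (k + 1 + (Nat.find hex - (l + 1)))) 0 = 0 := by
    rw [hper]; exact hj
  exact Nat.find_min hex (show k + 1 + (Nat.find hex - (l + 1)) < Nat.find hex by omega) hzero

-- hence the walk VALUES before the first zero are pairwise distinct (equal values have equal indices)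
theorem walk_values_distinct (L : List Int) (P : Int)
    (hex : ∃ j, PySem.List.pyGetD L (pvWalk L P j) 0 = 0) :
    ∀ k l, k < l → l < Nat.find hex → pvWalk L P k ≠ pvWalk L P l := by
  intro k l hkl hl hval
  exact walk_cells_distinct L P hex k l hkl hl (by rw [hval])

-- pigeonhole: the first zero appears within L.length steps
theorem first_zero_le_length (L : List Int) (P : Int)
    (hex : ∃ j, PySem.List.pyGetD L (pvWalk L P j) 0 = 0) :
    Nat.find hex ≤ L.length := by
  set j0 := Nat.find hex with hj0
  have hvalid : ∀ i : Fin j0, ∃ n, PySem.List.pyIdx? L.length (pvWalk L P i.1) = some n := by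
    intro i
    exact idx_of_getD_ne L _ (Nat.find_min hex i.2)
  classical
  let g : Fin j0 → Fin L.length := fun i =>
    ⟨(hvalid i).choose, pyIdx_lt (hvalid i).choose_spec⟩
  have hinj : Function.Injective g := by
    intro i1 i2 hgi
    by_contra hne
    have hne' : i1.1 ≠ i2.1 := fun h => hne (Fin.ext h)
    have hopt : PySem.List.pyIdx? L.length (pvWalk L P i1.1)
        = PySem.List.pyIdx? L.length (pvWalk L P i2.1) := by
      rw [(hvalid i1).choose_spec, (hvalid i2).choose_spec]
      have : (g i1).1 = (g i2).1 := by rw [hgi]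
      simpa [g] using this
    rcases Nat.lt_or_ge i1.1 i2.1 with h | h
    · exact walk_cells_distinct L P hex i1.1 i2.1 h i2.2 hopt
    · have h' : i2.1 < i1.1 := by omega
      exact walk_cells_distinct L P hex i2.1 i1.1 h' i1.2 hopt.symm
  have := Fintype.card_le_of_injective g hinj
  simpa using this

-- B's counting pass: on a chain whose first zero successor is at step j it returns steps + j
theorem countSteps_term (L : List Int) : ∀ (j : Nat) (c s : Int) (fuel : Nat),
    (∀ k < j, PySem.List.pyGetD L (pvWalk L c k) 0 ≠ 0) →
    PySem.List.pyGetD L (pvWalk L c j) 0 = 0 →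
    j < fuel →
    countSteps L c s fuel = s + j := by
  intro j
  induction j with
  | zero =>
    intro c s fuel _ hj hf
    obtain ⟨fl, rfl⟩ : ∃ fl, fuel = fl + 1 := ⟨fuel - 1, by omega⟩
    simp only [pvWalk] at hj
    simp [countSteps, hj]
  | succ j ih =>
    intro c s fuel h0 hj hf
    obtain ⟨fl, rfl⟩ : ∃ fl, fuel = fl + 1 := ⟨fuel - 1, by omega⟩
    have hc : PySem.List.pyGetD L c 0 ≠ 0 := by simpa [pvWalk] using h0 0 (Nat.succ_pos j)
    rw [countSteps, if_pos hc]
    have hres : countSteps L (PySem.List.pyGetD L c 0) (s + 1) fl = (s + 1) + j := by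
      apply ih
      · intro k hk; rw [pvWalk_shift]; exact h0 (k + 1) (by omega)
      · rw [pvWalk_shift]; exact hj
      · omega
    rw [hres]; push_cast; ring

-- Floyd's loop on a terminating chain (first zero at step j0): it breaks out with true
theorem loopFloyd_term (L : List Int) (P : Int)
    (hex : ∃ j, PySem.List.pyGetD L (pvWalk L P j) 0 = 0) :
    ∀ (fuel i : Nat), 2 * i ≤ Nat.find hex → Nat.find hex - 2 * i < 2 * fuel + 1 →
    loopFloyd L (pvWalk L P i) (pvWalk L P (2 * i)) fuel = true := by
  set j0 := Nat.find hex with hj0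
  intro fuel
  induction fuel with
  | zero =>
    intro i h2i hf
    rfl
  | succ fl ih =>
    intro i h2i hf
    rw [loopFloyd]
    by_cases hz : PySem.List.pyGetD L (pvWalk L P (2 * i)) 0 = 0
    · rw [if_pos hz]
    · rw [if_neg hz]
      have h2ilt : 2 * i < j0 := by
        rcases Nat.lt_or_ge (2 * i) j0 with h | h
        · exact h
        · exact absurd (by rw [show 2 * i = j0 by omega]; exact Nat.find_spec hex) hz
      have hfast1 : PySem.List.pyGetD L (pvWalk L P (2 * i)) 0 = pvWalk L P (2 * i + 1) := rfl
      by_cases hz1 : PySem.List.pyGetD L (pvWalk L P (2 * i + 1)) 0 = 0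
      · rw [hfast1, if_pos hz1]
      · rw [hfast1, if_neg hz1]
        have h2i1lt : 2 * i + 1 < j0 := by
          rcases Nat.lt_or_ge (2 * i + 1) j0 with h | h
          · exact h
          · exact absurd (by rw [show 2 * i + 1 = j0 by omega]; exact Nat.find_spec hex) hz1
        have hfast2 : PySem.List.pyGetD L (pvWalk L P (2 * i + 1)) 0 = pvWalk L P (2 * i + 2) := rfl
        have hslow1 : PySem.List.pyGetD L (pvWalk L P i) 0 = pvWalk L P (i + 1) := rfl
        have hne : pvWalk L P (i + 1) ≠ pvWalk L P (2 * i + 2) := by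
          rcases Nat.lt_or_ge (2 * i + 2) j0 with h | h
          · exact walk_values_distinct L P hex (i + 1) (2 * i + 2) (by omega) h
          · have h22 : 2 * i + 2 = j0 := by omega
            intro hval
            apply Nat.find_min hex (show i + 1 < j0 by omega)
            rw [hval, h22]
            exact Nat.find_spec hex
        rw [hfast2, hslow1, if_neg hne]
        have : pvWalk L P (2 * i + 2) = pvWalk L P (2 * (i + 1)) := by ring_nf
        rw [this]
        exact ih (i + 1) (by omega) (by omega)

-- periodicity: one index repeat makes the walk eventually periodic
theorem walk_periodic (L : List Int) (P : Int) (a p : Nat)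
    (hbase : pvWalk L P (a + 1) = pvWalk L P (a + 1 + p)) :
    ∀ (t m : Nat), a + 1 ≤ m → pvWalk L P m = pvWalk L P (m + t * p) := by
  have hone : ∀ m, a + 1 ≤ m → pvWalk L P m = pvWalk L P (m + p) := by
    intro m hm
    have := pvWalk_add L P (a + 1) (a + 1 + p) hbase (m - (a + 1))
    rw [show a + 1 + (m - (a + 1)) = m by omega,
        show a + 1 + p + (m - (a + 1)) = m + p by omega] at this
    exact this
  intro t
  induction t with
  | zero => intro m _; simp
  | succ t ih =>
    intro m hm
    calc pvWalk L P m = pvWalk L P (m + t * p) := ih m hm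
      _ = pvWalk L P (m + t * p + p) := hone (m + t * p) (by omega)
      _ = pvWalk L P (m + (t + 1) * p) := by ring_nf

-- in the cycle case the tortoise and hare meet: some k ≥ 1, k ≤ L.length², walk k = walk 2k
theorem exists_meeting (L : List Int) (P : Int)
    (hnz : ∀ k, PySem.List.pyGetD L (pvWalk L P k) 0 ≠ 0) :
    ∃ k, 1 ≤ k ∧ k ≤ L.length * L.length ∧ pvWalk L P k = pvWalk L P (2 * k) := by
  classical
  set n := L.length with hn
  have hvalid : ∀ i : Nat, ∃ m, PySem.List.pyIdx? n (pvWalk L P i) = some m := by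
    intro i; exact idx_of_getD_ne L _ (hnz i)
  have hnpos : 0 < n := by
    obtain ⟨m, hm⟩ := hvalid 0
    have := pyIdx_lt hm
    omega
  let g : Fin (n + 1) → Fin n := fun i =>
    ⟨(hvalid i.1).choose, pyIdx_lt (hvalid i.1).choose_spec⟩
  have hcard : Fintype.card (Fin n) < Fintype.card (Fin (n + 1)) := by simp
  obtain ⟨i1, i2, hne, hgi⟩ := Fintype.exists_ne_map_eq_of_card_lt g hcard
  -- order the repeat as a < b
  have hrepeat : ∀ (x y : Fin (n + 1)), x.1 < y.1 → g x = g y →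
      ∃ k, 1 ≤ k ∧ k ≤ n * n ∧ pvWalk L P k = pvWalk L P (2 * k) := by
    intro x y hxy hg
    set a := x.1
    set b := y.1
    have hidx : PySem.List.pyIdx? n (pvWalk L P a) = PySem.List.pyIdx? n (pvWalk L P b) := by
      rw [(hvalid a).choose_spec, (hvalid b).choose_spec]
      have : (g x).1 = (g y).1 := by rw [hg]
      simpa [g] using this
    have hstep : pvWalk L P (a + 1) = pvWalk L P (b + 1) := by
      simp only [pvWalk]
      exact getD_congr_idx L _ _ hidx
    set p := b - a with hpdef
    have hp : 0 < p := by omega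
    have hbase : pvWalk L P (a + 1) = pvWalk L P (a + 1 + p) := by
      rw [show a + 1 + p = b + 1 by omega]; exact hstep
    refine ⟨(a + 1) * p, Nat.mul_pos (Nat.succ_pos a) hp, ?_, ?_⟩
    · have ha : a + 1 ≤ n := by omega
      have hpn : p ≤ n := by omega
      calc (a + 1) * p ≤ n * p := Nat.mul_le_mul_right p ha
        _ ≤ n * n := Nat.mul_le_mul_left n hpn
    · have := walk_periodic L P a p hbase (a + 1) ((a + 1) * p) (by nlinarith)
      rw [show 2 * ((a + 1) * p) = (a + 1) * p + (a + 1) * p by ring]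
      exact this
  rcases Nat.lt_or_ge i1.1 i2.1 with h | h
  · exact hrepeat i1 i2 h hgi
  · have h' : i2.1 < i1.1 := by
      rcases Nat.lt_or_ge i2.1 i1.1 with h2 | h2
      · exact h2
      · exact absurd (Fin.ext (by omega)) hne
    exact hrepeat i2 i1 h' hgi.symm

-- Floyd's loop in the cycle case: given a meeting ahead, it returns false
theorem loopFloyd_cycle (L : List Int) (P : Int)
    (hnz : ∀ k, PySem.List.pyGetD L (pvWalk L P k) 0 ≠ 0) :
    ∀ (fuel i k : Nat), i < k → pvWalk L P k = pvWalk L P (2 * k) → k - i ≤ fuel →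
    loopFloyd L (pvWalk L P i) (pvWalk L P (2 * i)) fuel = false := by
  intro fuel
  induction fuel with
  | zero => intro i k hik _ hf; omega
  | succ fl ih =>
    intro i k hik hmeet hf
    rw [loopFloyd, if_neg (hnz (2 * i))]
    have hfast1 : PySem.List.pyGetD L (pvWalk L P (2 * i)) 0 = pvWalk L P (2 * i + 1) := rfl
    rw [hfast1, if_neg (hnz (2 * i + 1))]
    have hfast2 : PySem.List.pyGetD L (pvWalk L P (2 * i + 1)) 0 = pvWalk L P (2 * i + 2) := rfl
    have hslow1 : PySem.List.pyGetD L (pvWalk L P i) 0 = pvWalk L P (i + 1) := rfl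
    rw [hfast2, hslow1]
    by_cases hmeetnow : pvWalk L P (i + 1) = pvWalk L P (2 * i + 2)
    · rw [if_pos hmeetnow]
    · rw [if_neg hmeetnow]
      have hik1 : i + 1 < k := by
        rcases Nat.lt_or_ge (i + 1) k with h | h
        · exact h
        · have hk : k = i + 1 := by omega
          exact absurd (by rw [← hk, show 2 * i + 2 = 2 * k by omega]; exact hmeet) hmeetnow
      have : pvWalk L P (2 * i + 2) = pvWalk L P (2 * (i + 1)) := by ring_nf
      rw [this]
      exact ih (i + 1) k hik1 hmeet (by omega)

-- ===== VERDICT (by name: the statement is the Claim_ definition above) =====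
theorem solve_spec : Claim_equal_solve := by
  intro N M P fav hate _ _
  show solve N M P fav hate = solve_alt N M P fav hate
  simp only [solve, solve_alt]
  set L := buildNext M (fav.zip hate) with hLdef
  have hlen : L.length = (M + 1).toNat := length_buildNext M (fav.zip hate)
  set n := (M + 1).toNat with hndef
  by_cases hex : ∃ j, PySem.List.pyGetD L (pvWalk L P j) 0 = 0
  · set j0 := Nat.find hex with hj0
    have hj0le : j0 ≤ n := by
      have := first_zero_le_length L P hex
      omega
    have hA : loopA L (List.replicate n false) P 0 (n + 1) = 0 + (j0 : Int) := by
      apply loopA_term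
      · simp [hlen]
      · intro k hk; exact Nat.find_min hex hk
      · exact Nat.find_spec hex
      · intro k _; exact getD_replicate_false _ _
      · exact walk_cells_distinct L P hex
      · omega
    have hF : loopFloyd L P P (n * n + 1) = true := by
      have := loopFloyd_term L P hex (n * n + 1) 0 (by omega) (by
        have h2 : Nat.find hex ≤ n := hj0le
        have h3 : n ≤ n * n + 1 := by
          rcases Nat.eq_zero_or_pos n with h | h
          · simp [h]
          · nlinarith
        omega)
      simpa [pvWalk] using this
    have hC : countSteps L P 0 (n + 1) = 0 + (j0 : Int) := by
      apply countSteps_term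
      · intro k hk; exact Nat.find_min hex hk
      · exact Nat.find_spec hex
      · omega
    rw [hA, hF, if_pos rfl, hC]
  · push_neg at hex
    have hA : loopA L (List.replicate n false) P 0 (n + 1) = -1 := by
      apply loopA_cycle
      · simp [hlen]
      · exact hex
      · simp
    obtain ⟨k, hk1, hkn, hmeet⟩ := exists_meeting L P hex
    have hF : loopFloyd L P P (n * n + 1) = false := by
      have := loopFloyd_cycle L P hex (n * n + 1) 0 k (by omega) hmeet
        (by rw [hlen] at hkn; omega)
      simpa [pvWalk] using this
    rw [hA, hF, if_neg (by simp)]
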